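-- pv_equiv track=rewrite | github.com/mjoscl/cs-i | Homework 4/test_debug1.py | nextAnswerDigit
-- ===== SOURCE A (Python) =====
-- def nextAnswerDigit(currentAnswer, remainder):
--     """
--     computes the next digit of the answer based on the
--     currentAnswer and the current remainder.
--     :param currentAnswer: answer so far
--     :param remainder: remainder so far
--     :return: the next digit of the answer
--     """
--
--     # first we double the currentAnswer
--     currentAnswer *= 2
--
--     # then we want the largest digit, d, such that
--     # current answer with d added as a last digit, then
--     # multiplied by d, is less than or equal to the current remainder
--
--     d = 9
--     while d >= 0:
--         product = (10*currentAnswer + d) * d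
--         if product <= remainder:
--             return d
--         d -= 1
-- ===== SOURCE B (Python) =====
-- def nextAnswerDigit(currentAnswer, remainder):
--     """
--     Largest digit d in 0..9 with (20*currentAnswer + d) * d <= remainder,
--     found by binary search over the digit range (the satisfying set is an
--     initial segment of 0..9 when remainder >= 0); None if no digit works.
--     """
--     if remainder < 0:
--         return None
--     base = 20 * currentAnswer
--     lo, hi = 0, 9  # invariant: digit lo satisfies; every digit above hi fails
--     while lo < hi:
--         mid = (lo + hi + 1) // 2
--         if (base + mid) * mid <= remainder:
--             lo = mid
--         else:
--             hi = mid - 1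
--     return lo
-- ===== Notes on version B (the rewrite author's own statement) =====
-- stated objective: alternative
-- what changed: Replaces A's descending 9-to-0 linear scan for the largest admissible digit with a binary search over the digit range, justified by the fact that for nonnegative remainder the admissible digits form an initial segment of 0..9.
-- outside the precondition, e.g. on nextAnswerDigit(3, -1): A returns None, B returns None; on nextAnswerDigit(-1, -1): A returns 9, B returns None
import Mathlib
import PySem

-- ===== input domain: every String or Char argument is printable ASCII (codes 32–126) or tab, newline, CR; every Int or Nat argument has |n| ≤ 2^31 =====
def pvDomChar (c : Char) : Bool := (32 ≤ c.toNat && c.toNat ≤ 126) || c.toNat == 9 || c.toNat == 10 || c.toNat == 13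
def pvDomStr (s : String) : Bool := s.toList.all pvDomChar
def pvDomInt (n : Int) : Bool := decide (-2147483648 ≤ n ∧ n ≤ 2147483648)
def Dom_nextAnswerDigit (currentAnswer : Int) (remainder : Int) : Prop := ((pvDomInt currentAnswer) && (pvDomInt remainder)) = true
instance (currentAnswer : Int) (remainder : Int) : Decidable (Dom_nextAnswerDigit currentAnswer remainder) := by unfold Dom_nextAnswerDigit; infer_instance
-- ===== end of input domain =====

-- B replaces A's descending linear scan over digits 9..0 with a binary search over 0..9
-- (alternative decomposition; admissible digits form an initial segment when remainder ≥ 0).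


-- ===== PORT A =====
-- A's while-loop: d counts down from 9; return the first d with (10*c2 + d) * d ≤ remainder.
-- When d drops below 0 the Python falls off the loop and returns None (no Int value): those
-- inputs (remainder < 0) are excluded by Pre_; the port returns 0 there, a value never claimed.
def nextAnswerDigitLoopA (currentAnswer2 : Int) (remainder : Int) (d : Int) : Int :=
  if 0 ≤ d then
    if (10 * currentAnswer2 + d) * d ≤ remainder then d
    else nextAnswerDigitLoopA currentAnswer2 remainder (d - 1)
  else 0
termination_by (d + 1).toNat
decreasing_by omega

def nextAnswerDigit (currentAnswer : Int) (remainder : Int) : Int :=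
  nextAnswerDigitLoopA (currentAnswer * 2) remainder 9

-- ===== PORT B =====
-- B's while-loop: binary search; invariant: digit lo satisfies, every digit above hi fails.
def nextAnswerDigitLoopB (base : Int) (remainder : Int) (lo : Int) (hi : Int) : Int :=
  if h : lo < hi then
    let mid := PySem.Int.floordiv (lo + hi + 1) 2
    if (base + mid) * mid ≤ remainder then nextAnswerDigitLoopB base remainder mid hi
    else nextAnswerDigitLoopB base remainder lo (mid - 1)
  else lo
termination_by (hi - lo).toNat
decreasing_by
  · have := PySem.Int.floordiv_eq_ediv_of_pos (a := lo + hi + 1) (b := 2) (by omega)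
    simp only [mid, this] at *; omega
  · have := PySem.Int.floordiv_eq_ediv_of_pos (a := lo + hi + 1) (b := 2) (by omega)
    simp only [mid, this] at *; omega

def nextAnswerDigit_alt (currentAnswer : Int) (remainder : Int) : Int :=
  -- the `remainder < 0 → None` branch of Source B lies outside Pre_ (None is not an Int)
  nextAnswerDigitLoopB (20 * currentAnswer) remainder 0 9

-- ===== PRECONDITION & SPEC =====
-- Pre_ excludes remainder < 0, outside the digit-by-digit square-root invariant this helper is
-- written for: there A returns None (no Int value, e.g. (3,-1)) or, for negative currentAnswer,
-- an accidental digit from its descending scan (e.g. (-1,-1) -> 9, since the admissible digits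
-- are no longer an initial segment of 0..9), while B reports no digit (None).
def Pre_nextAnswerDigit (currentAnswer : Int) (remainder : Int) : Prop := 0 ≤ remainder
instance (currentAnswer : Int) (remainder : Int) : Decidable (Pre_nextAnswerDigit currentAnswer remainder) := by unfold Pre_nextAnswerDigit; infer_instance
def pvWitness_nextAnswerDigit : Int × Int := (7, 300)

def Spec_nextAnswerDigit (currentAnswer : Int) (remainder : Int) (out : Int) : Prop := out = nextAnswerDigit_alt currentAnswer remainder
instance (currentAnswer : Int) (remainder : Int) (out : Int) : Decidable (Spec_nextAnswerDigit currentAnswer remainder out) := by unfold Spec_nextAnswerDigit; infer_instance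

-- ===== CLAIM (what is proved, stated in full; the proofs are below) =====
def Claim_equal_nextAnswerDigit : Prop := ∀ (currentAnswer : Int) (remainder : Int), Dom_nextAnswerDigit currentAnswer remainder → Pre_nextAnswerDigit currentAnswer remainder → Spec_nextAnswerDigit currentAnswer remainder (nextAnswerDigit currentAnswer remainder)

-- ===== LEMMAS AND PROOFS =====

-- the digit test both programs use, with base = 20 * currentAnswer
def pvSat (base remainder d : Int) : Prop := (base + d) * d ≤ remainder

-- downward closedness: for 0 ≤ a ≤ b and 0 ≤ remainder, if digit b satisfies then so does a
theorem pvSat_mono (base remainder a b : Int) (hr : 0 ≤ remainder) (ha : 0 ≤ a)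
    (hab : a ≤ b) (hb : pvSat base remainder b) : pvSat base remainder a := by
  unfold pvSat at *
  by_contra hcon
  rw [not_le] at hcon
  rcases ha.lt_or_eq with ha0 | ha0
  · have hba : 0 < base + a := by nlinarith
    nlinarith [mul_nonneg (sub_nonneg.2 hab) (by nlinarith : (0:ℤ) ≤ base + a + b)]
  · rw [← ha0] at hcon; simp at hcon; omega

-- A's loop returns the largest d' ≤ d satisfying the digit test (digit 0 always satisfies)
theorem loopA_spec (c2 remainder : Int) (hr : 0 ≤ remainder) :
    ∀ d : Int, 0 ≤ d →
    pvSat (10 * c2) remainder (nextAnswerDigitLoopA c2 remainder d) ∧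
    0 ≤ nextAnswerDigitLoopA c2 remainder d ∧
    nextAnswerDigitLoopA c2 remainder d ≤ d ∧
    ∀ e, nextAnswerDigitLoopA c2 remainder d < e → e ≤ d →
      ¬ pvSat (10 * c2) remainder e := by
  intro d hd
  induction d, hd using Int.le_induction with
  | base =>
    have h0 : (10 * c2 + 0) * 0 ≤ remainder := by simpa using hr
    rw [nextAnswerDigitLoopA, if_pos (le_refl (0:Int)), if_pos h0]
    exact ⟨by simpa [pvSat] using hr, le_refl _, le_refl _, fun e he1 he2 => by omega⟩
  | succ n hn ih =>
    rw [nextAnswerDigitLoopA]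
    have h01 : (0:Int) ≤ n + 1 := by omega
    simp only [h01, if_true]
    by_cases hs : (10 * c2 + (n + 1)) * (n + 1) ≤ remainder
    · simp only [hs, if_pos]
      exact ⟨hs, by omega, le_refl _, fun e he1 he2 => by omega⟩
    · simp only [hs, if_neg, not_false_iff]
      have hrec := ih
      have harg : n + 1 - 1 = n := by ring
      rw [harg]
      refine ⟨hrec.1, hrec.2.1, by omega, ?_⟩
      intro e he1 he2
      by_cases hen : e ≤ n
      · exact hrec.2.2.2 e he1 hen
      · have : e = n + 1 := by omega
        subst this; exact hs

-- B's loop maintains its invariant (lo satisfies, everything above hi fails) to the boundary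
theorem loopB_aux (base remainder : Int) (hr : 0 ≤ remainder) :
    ∀ n : ℕ, ∀ lo hi : Int, (hi - lo).toNat = n → 0 ≤ lo → lo ≤ hi →
    pvSat base remainder lo →
    (∀ e, hi < e → e ≤ 9 → ¬ pvSat base remainder e) →
    pvSat base remainder (nextAnswerDigitLoopB base remainder lo hi) ∧
    0 ≤ nextAnswerDigitLoopB base remainder lo hi ∧
    nextAnswerDigitLoopB base remainder lo hi ≤ hi ∧
    ∀ e, nextAnswerDigitLoopB base remainder lo hi < e → e ≤ 9 →
      ¬ pvSat base remainder e := by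
  intro n
  induction n using Nat.strong_induction_on with
  | _ n ih =>
    intro lo hi hn hlo hlohi hsat hfail
    rw [nextAnswerDigitLoopB]
    by_cases h : lo < hi
    · simp only [h, dif_pos]
      have hm : PySem.Int.floordiv (lo + hi + 1) 2 = (lo + hi + 1) / 2 :=
        PySem.Int.floordiv_eq_ediv_of_pos (by omega)
      set mid := PySem.Int.floordiv (lo + hi + 1) 2 with hmid
      have hb1 : lo < mid := by omega
      have hb2 : mid ≤ hi := by omega
      by_cases hs : (base + mid) * mid ≤ remainder
      · simp only [hs, if_pos]
        exact ih (hi - mid).toNat (by omega) mid hi rfl (by omega) hb2 hs hfail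
      · simp only [hs, if_neg, not_false_iff]
        have hrec := ih (mid - 1 - lo).toNat (by omega) lo (mid - 1) rfl hlo (by omega) hsat
          (by
            intro e he1 he2 hesat
            by_cases heh : e ≤ hi
            · exact hs (pvSat_mono base remainder mid e hr (by omega) (by omega) hesat)
            · exact hfail e (by omega) he2 hesat)
        obtain ⟨r1, r2, r3, r4⟩ := hrec
        exact ⟨r1, r2, by omega, r4⟩
    · simp only [h, dif_neg, not_false_iff]
      have : lo = hi := by omega
      exact ⟨hsat, hlo, le_of_eq this, fun e he1 he2 => hfail e (by omega) he2⟩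

-- ===== VERDICT (by name: the statement is the Claim_ definition above) =====
theorem nextAnswerDigit_spec : Claim_equal_nextAnswerDigit := by
  intro ca r _ hpre
  have hr : (0:Int) ≤ r := hpre
  unfold Spec_nextAnswerDigit nextAnswerDigit nextAnswerDigit_alt
  have hbase : 10 * (ca * 2) = 20 * ca := by ring
  have hA := loopA_spec (ca * 2) r hr 9 (by omega)
  rw [hbase] at hA
  have hB := loopB_aux (20 * ca) r hr 9 0 9 (by decide) (by omega) (by omega)
      (by simp [pvSat]; omega) (fun e he1 he2 h' => by omega)
  obtain ⟨hA1, hA2, hA3, hA4⟩ := hA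
  obtain ⟨hB1, hB2, hB3, hB4⟩ := hB
  rcases lt_trichotomy (nextAnswerDigitLoopA (ca * 2) r 9) (nextAnswerDigitLoopB (20 * ca) r 0 9) with h | h | h
  · exact absurd hB1 (hA4 _ h (by omega))
  · exact h
  · exact absurd hA1 (hB4 _ h (by omega))
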